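-- pv_equiv track=rewrite | github.com/vchakrab/DiffDel | greedy_gumbel.py | find_inference_paths_str
-- ===== SOURCE A (Python) =====
-- from typing import Set, Dict, List, Tuple, Iterable, Optional, Optional
--
-- def find_inference_paths_str(hyperedges: List[Tuple[str, ...]],
--                              target_cell: str,
--                              initial_known: Set[str] = None) -> List[List[int]]:
--     # ... (find_inference_paths_str remains unchanged)
--     if initial_known is None:
--         raise ValueError("initial_known must be provided")
--
--     all_paths = []
--     seen_paths = set()
--
--     def dfs(known_cells: Set[str], used_edges: Set[int], current_path: List[int],
--             can_assume_known: Set[str]):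
--
--         for edge_idx, edge in enumerate(hyperedges):
--             if edge_idx in used_edges:
--                 continue
--
--             for inferred_cell in edge:
--                 if inferred_cell in known_cells:
--                     continue
--
--                 other_cells = [c for c in edge if c != inferred_cell]
--
--                 if all(c in known_cells for c in other_cells):
--                     new_known = known_cells | {inferred_cell}
--                     new_used = used_edges | {edge_idx}
--                     new_path = current_path + [edge_idx]
--
--                     if inferred_cell == target_cell:
--                         path_tuple = tuple(new_path)
--                         if path_tuple not in seen_paths:
--                             seen_paths.add(path_tuple)
--                             all_paths.append(new_path)
--
--                     dfs(new_known, new_used, new_path, can_assume_known)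
--
--                 elif inferred_cell == target_cell:
--                     unknown_cells = [c for c in other_cells if c not in known_cells]
--                     if all(c in can_assume_known for c in unknown_cells):
--                         new_path = current_path + [edge_idx]
--                         path_tuple = tuple(new_path)
--                         if path_tuple not in seen_paths:
--                             seen_paths.add(path_tuple)
--                             all_paths.append(new_path)
--
--     all_cells = set()
--     for edge in hyperedges:
--         all_cells.update(edge)
--     potentially_inferrable = all_cells - initial_known - {target_cell}
--
--     dfs(initial_known, set(), [], potentially_inferrable)
--     return all_paths
-- ===== SOURCE B (Python) =====
-- def find_inference_paths_str(hyperedges, target_cell, initial_known=None):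
--     # Iterative DFS: an explicit stack of suspended frames replaces A's
--     # recursion; each frame resumes its saved scan position in one precomputed,
--     # flattened (edge_idx, edge, cell) worklist.
--     if initial_known is None:
--         raise ValueError("initial_known must be provided")
--
--     all_cells = set()
--     for edge in hyperedges:
--         all_cells.update(edge)
--     assumable = all_cells - set(initial_known) - {target_cell}
--
--     items = [(i, edge, cell) for i, edge in enumerate(hyperedges) for cell in edge]
--
--     all_paths = []
--     seen = set()
--
--     def emit(path):
--         t = tuple(path)
--         if t not in seen:
--             seen.add(t)
--             all_paths.append(path)
--
--     stack = [(set(initial_known), set(), [], 0)]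
--     while stack:
--         known, used, path, pos = stack.pop()
--         while pos < len(items):
--             i, edge, cell = items[pos]
--             pos += 1
--             if i in used or cell in known:
--                 continue
--             others = [c for c in edge if c != cell]
--             unknown = [c for c in others if c not in known]
--             if not unknown:
--                 new_path = path + [i]
--                 if cell == target_cell:
--                     emit(new_path)
--                 # suspend this frame; the child is explored fully first
--                 stack.append((known, used, path, pos))
--                 known, used, path, pos = known | {cell}, used | {i}, new_path, 0
--             elif cell == target_cell and all(c in assumable for c in unknown):
--                 emit(path + [i])
--     return all_paths
-- ===== Notes on version B (the rewrite author's own statement) =====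
-- stated objective: alternative
-- what changed: A explores via a recursive dfs with two nested loops (edges, then cells) per call; B is an iterative search driven by an explicit stack of suspended frames, each resuming a suffix of one precomputed flattened (edge_idx, edge, cell) worklist, with the child frame fully explored before the parent resumes.
import Mathlib
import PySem

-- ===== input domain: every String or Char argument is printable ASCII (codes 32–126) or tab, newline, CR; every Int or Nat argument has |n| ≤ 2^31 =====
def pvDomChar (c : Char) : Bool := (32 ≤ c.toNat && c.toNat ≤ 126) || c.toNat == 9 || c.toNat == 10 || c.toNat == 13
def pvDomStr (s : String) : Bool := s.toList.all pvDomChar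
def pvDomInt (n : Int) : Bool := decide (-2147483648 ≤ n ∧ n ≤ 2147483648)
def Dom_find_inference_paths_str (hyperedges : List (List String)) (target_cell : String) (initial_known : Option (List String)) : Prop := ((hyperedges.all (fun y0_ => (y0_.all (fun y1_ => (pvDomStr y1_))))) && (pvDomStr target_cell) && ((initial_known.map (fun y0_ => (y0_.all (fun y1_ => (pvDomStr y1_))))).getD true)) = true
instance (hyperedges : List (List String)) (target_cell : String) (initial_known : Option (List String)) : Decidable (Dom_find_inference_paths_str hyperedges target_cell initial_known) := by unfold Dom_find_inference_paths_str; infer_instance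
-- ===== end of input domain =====

-- B replaces A's recursive DFS by an iterative search driven by an explicit stack of
-- suspended frames, each resuming a suffix of one precomputed flattened
-- (edge_idx, edge, cell) worklist (objective: alternative decomposition; same cost).

-- ===== PORT A =====
-- A's recursive dfs; the fuel argument only makes the recursion structural
-- (each recursive call marks one more edge used, so fuel = |hyperedges| + 1 is never exhausted).
def pvDfsA (hyperedges : List (List String)) (target_cell : String)
    (can_assume_known : PySem.Set String) :
    Nat → PySem.Set String → PySem.Set Int → List Int →
    PySem.Set (List Int) × List (List Int) → PySem.Set (List Int) × List (List Int)
  | 0, _, _, _, st => st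
  | fuel+1, known_cells, used_edges, current_path, st =>
    (PySem.List.enumerate hyperedges 0).foldl (fun st p =>
      if PySem.Set.contains used_edges p.1 then st
      else p.2.foldl (fun st inferred_cell =>
        if PySem.Set.contains known_cells inferred_cell then st
        else
          let other_cells := p.2.filter (fun c => c != inferred_cell)
          if other_cells.all (fun c => PySem.Set.contains known_cells c) then
            let new_known := PySem.Set.add known_cells inferred_cell
            let new_used := PySem.Set.add used_edges p.1
            let new_path := current_path ++ [p.1]
            let st' := if inferred_cell = target_cell then
                (if PySem.Set.contains st.1 new_path then st
                 else (PySem.Set.add st.1 new_path, st.2 ++ [new_path]))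
              else st
            pvDfsA hyperedges target_cell can_assume_known fuel new_known new_used new_path st'
          else if inferred_cell = target_cell then
            let unknown_cells := other_cells.filter (fun c => !(PySem.Set.contains known_cells c))
            if unknown_cells.all (fun c => PySem.Set.contains can_assume_known c) then
              let new_path := current_path ++ [p.1]
              if PySem.Set.contains st.1 new_path then st
              else (PySem.Set.add st.1 new_path, st.2 ++ [new_path])
            else st
          else st) st) st

def find_inference_paths_str (hyperedges : List (List String)) (target_cell : String) (initial_known : Option (List String)) : List (List Int) :=
  match initial_known with
  | none => []  -- Python raises ValueError here; excluded by Pre_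
  | some ik =>
    let all_cells : PySem.Set String :=
      hyperedges.foldl (fun s e => PySem.Set.update s e) PySem.Set.empty
    let potentially_inferrable : PySem.Set String :=
      PySem.Set.diff (PySem.Set.diff all_cells (PySem.Set.ofList ik)) [target_cell]
    (pvDfsA hyperedges target_cell potentially_inferrable (hyperedges.length + 1)
      (PySem.Set.ofList ik) PySem.Set.empty [] (PySem.Set.empty, [])).2

-- ===== PORT B =====
-- Source B's shared emit helper (first-occurrence de-duplication into (seen, all_paths))
def pvEmit (st : PySem.Set (List Int) × List (List Int)) (q : List Int) :
    PySem.Set (List Int) × List (List Int) :=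
  if PySem.Set.contains st.1 q then st else (PySem.Set.add st.1 q, st.2 ++ [q])

-- Source B's flattened worklist: [(i, edge, cell) for i, edge in enumerate(hyperedges) for cell in edge]
def pvItems (hyperedges : List (List String)) : List (Int × List String × String) :=
  (PySem.List.enumerate hyperedges 0).flatMap (fun p => p.2.map (fun c => (p.1, p.2, c)))

-- fuel bounding the number of iterations of Source B's while loops (it only totalizes
-- the loop; it is proved sufficient below)
def pvFuel (L : Nat) : Nat → Nat
  | 0 => 1
  | d+1 => L * (1 + pvFuel L d) + 1

-- Source B's stack machine: a frame is (known, used, path, remaining worklist);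
-- the remaining worklist is Source B's items[pos:] for the frame's saved position pos.
-- One pvRunB step is one iteration of Source B's loops (pop an exhausted frame, or
-- consume the next work item of the top frame).
def pvRunB (items : List (Int × List String × String)) (T : String) (AS : PySem.Set String) :
    Nat → List (PySem.Set String × PySem.Set Int × List Int × List (Int × List String × String)) →
    PySem.Set (List Int) × List (List Int) → PySem.Set (List Int) × List (List Int)
  | 0, _, st => st
  | _+1, [], st => st
  | fuel+1, (_, _, _, []) :: rest, st => pvRunB items T AS fuel rest st
  | fuel+1, (known, used, path, (i, e, c) :: work) :: rest, st =>
    if PySem.Set.contains used i || PySem.Set.contains known c then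
      pvRunB items T AS fuel ((known, used, path, work) :: rest) st
    else
      let others := e.filter (fun x => x != c)
      let unknown := others.filter (fun x => !(PySem.Set.contains known x))
      if unknown.isEmpty then
        let new_path := path ++ [i]
        let st' := if c = T then pvEmit st new_path else st
        pvRunB items T AS fuel
          ((PySem.Set.add known c, PySem.Set.add used i, new_path, items)
            :: (known, used, path, work) :: rest) st'
      else if c = T ∧ unknown.all (fun x => PySem.Set.contains AS x) then
        pvRunB items T AS fuel ((known, used, path, work) :: rest) (pvEmit st (path ++ [i]))
      else
        pvRunB items T AS fuel ((known, used, path, work) :: rest) st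

def find_inference_paths_str_alt (hyperedges : List (List String)) (target_cell : String) (initial_known : Option (List String)) : List (List Int) :=
  match initial_known with
  | none => []  -- Python raises ValueError here; excluded by Pre_
  | some ik =>
    let all_cells : PySem.Set String :=
      hyperedges.foldl (fun s e => PySem.Set.update s e) PySem.Set.empty
    let assumable : PySem.Set String :=
      PySem.Set.diff (PySem.Set.diff all_cells (PySem.Set.ofList ik)) [target_cell]
    let items := pvItems hyperedges
    (pvRunB items target_cell assumable (pvFuel items.length (hyperedges.length + 1))
      [(PySem.Set.ofList ik, PySem.Set.empty, [], items)] (PySem.Set.empty, [])).2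

-- ===== PRECONDITION & SPEC =====
-- Pre_ excludes only initial_known = None, where the Python A (and B) raise ValueError.
def Pre_find_inference_paths_str (hyperedges : List (List String)) (target_cell : String) (initial_known : Option (List String)) : Prop :=
  initial_known.isSome = true
instance (hyperedges : List (List String)) (target_cell : String) (initial_known : Option (List String)) : Decidable (Pre_find_inference_paths_str hyperedges target_cell initial_known) := by unfold Pre_find_inference_paths_str; infer_instance

def pvWitness_find_inference_paths_str : List (List String) × String × Option (List String) :=
  ([["a", "b"], ["b", "c"]], "c", some ["a"])

def Spec_find_inference_paths_str (hyperedges : List (List String)) (target_cell : String) (initial_known : Option (List String)) (out : List (List Int)) : Prop := out = find_inference_paths_str_alt hyperedges target_cell initial_known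
instance (hyperedges : List (List String)) (target_cell : String) (initial_known : Option (List String)) (out : List (List Int)) : Decidable (Spec_find_inference_paths_str hyperedges target_cell initial_known out) := by unfold Spec_find_inference_paths_str; infer_instance

-- ===== CLAIM (what is proved, stated in full; the proofs are below) =====
def Claim_equal_find_inference_paths_str : Prop := ∀ (hyperedges : List (List String)) (target_cell : String) (initial_known : Option (List String)), Dom_find_inference_paths_str hyperedges target_cell initial_known → Pre_find_inference_paths_str hyperedges target_cell initial_known → Spec_find_inference_paths_str hyperedges target_cell initial_known (find_inference_paths_str hyperedges target_cell initial_known)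

-- ===== LEMMAS AND PROOFS =====

-- the common intermediate form: A's dfs rephrased as one fold over a suffix of the
-- flattened worklist, with depth fuel d (children descend on the full worklist)
def pvProc (items : List (Int × List String × String)) (T : String) (AS : PySem.Set String) :
    Nat → PySem.Set String → PySem.Set Int → List Int →
    List (Int × List String × String) →
    PySem.Set (List Int) × List (List Int) → PySem.Set (List Int) × List (List Int)
  | 0, _, _, _, _, st => st
  | d+1, known, used, path, ws, st =>
    ws.foldl (fun st it =>
      if PySem.Set.contains used it.1 || PySem.Set.contains known it.2.2 then st
      else
        let others := it.2.1.filter (fun x => x != it.2.2)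
        let unknown := others.filter (fun x => !(PySem.Set.contains known x))
        if unknown.isEmpty then
          pvProc items T AS d (PySem.Set.add known it.2.2) (PySem.Set.add used it.1)
            (path ++ [it.1]) items
            (if it.2.2 = T then pvEmit st (path ++ [it.1]) else st)
        else if it.2.2 = T ∧ unknown.all (fun x => PySem.Set.contains AS x) then
          pvEmit st (path ++ [it.1])
        else st) st

-- A's nested (edge, cell) loops flatten to pvProc over the flattened worklist
lemma pv_foldl_flatMap {α β σ : Type} (f : σ → α → σ) (g : α → List β) (h : σ → β → σ)
    (hfg : ∀ st a, f st a = (g a).foldl h st) :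
    ∀ (l : List α) (st : σ), l.foldl f st = (l.flatMap g).foldl h st := by
  intro l
  induction l with
  | nil => intro st; rfl
  | cons a l ihl =>
    intro st
    simp only [List.foldl_cons, List.flatMap_cons, List.foldl_append, hfg]
    exact ihl _

lemma pv_foldl_const {α σ : Type} (f : σ → α → σ) (l : List α) (st : σ)
    (h : ∀ st a, f st a = st) : l.foldl f st = st := by
  induction l generalizing st with
  | nil => rfl
  | cons a l ihl => rw [List.foldl_cons, h]; exact ihl st

lemma pv_all_contains (k : PySem.Set String) (l : List String) :
    (l.all fun c => PySem.Set.contains k c)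
      = (l.filter fun x => !(PySem.Set.contains k x)).isEmpty := by
  induction l with
  | nil => rfl
  | cons x xs ih =>
    cases h : PySem.Set.contains k x <;>
      simp only [List.all_cons, List.filter_cons, h, Bool.not_false, Bool.not_true,
        Bool.false_and, Bool.true_and, Bool.false_eq_true, if_true, if_false, List.isEmpty_cons, ih]

lemma pvDfsA_eq_proc (H : List (List String)) (T : String) (AS : PySem.Set String) :
    ∀ (d : Nat) (k : PySem.Set String) (u : PySem.Set Int) (p : List Int)
      (st : PySem.Set (List Int) × List (List Int)),
      pvDfsA H T AS d k u p st = pvProc (pvItems H) T AS d k u p (pvItems H) st := by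
  intro d
  induction d with
  | zero => intro k u p st; rfl
  | succ d ih =>
    intro k u p st
    simp only [pvDfsA, pvProc]
    refine pv_foldl_flatMap _ _ _ ?_ (PySem.List.enumerate H 0) st
    intro st q
    rw [List.foldl_map]
    by_cases hused : PySem.Set.contains u q.1 = true
    · rw [if_pos hused]
      symm
      apply pv_foldl_const
      intro st' c
      simp only [hused, Bool.true_or, if_true]
    · rw [if_neg hused]
      have hf : PySem.Set.contains u q.1 = false := by
        cases h : PySem.Set.contains u q.1
        · rfl
        · exact absurd h hused
      apply PySem.List.foldl_congr_mem
      intro st' c _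
      simp only [hf, Bool.false_or]
      rw [pv_all_contains]
      rw [ih]
      simp only [pvEmit]
      by_cases hk : PySem.Set.contains k c = true
      · rw [if_pos hk, if_pos hk]
      · rw [if_neg hk, if_neg hk]
        by_cases hie : ((q.2.filter fun x => x != c).filter
            fun x => !(PySem.Set.contains k x)).isEmpty = true
        · rw [if_pos hie, if_pos hie]
        · rw [if_neg hie, if_neg hie]
          by_cases hT : c = T
          · by_cases hall : ((q.2.filter fun x => x != c).filter
                fun x => !(PySem.Set.contains k x)).all
                  (fun x => PySem.Set.contains AS x) = true
            · rw [if_pos hT, if_pos hall, if_pos (And.intro hT hall)]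
            · rw [if_pos hT, if_neg hall, if_neg]
              exact fun h => hall h.2
          · rw [if_neg hT, if_neg]
            exact fun h => hT h.1

-- number of unused edge indices below n
def pvUnused (n : Nat) (u : PySem.Set Int) : Nat :=
  ((Finset.range n).filter (fun (j : Nat) => PySem.Set.contains u ((j : Nat) : Int) = false)).card

lemma pvUnused_add (n : Nat) (u : PySem.Set Int) (j0 : Nat) (hj : j0 < n)
    (hu : PySem.Set.contains u (j0 : Int) = false) :
    pvUnused n (PySem.Set.add u (j0 : Int)) + 1 = pvUnused n u := by
  have hmem : ∀ j : Nat,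
      (PySem.Set.contains (PySem.Set.add u (j0 : Int)) (j : Int) = false)
        ↔ (PySem.Set.contains u (j : Int) = false ∧ j ≠ j0) := by
    intro j
    simp only [← Bool.not_eq_true, PySem.Set.contains_iff, PySem.Set.mem_add, not_or, ne_eq,
      Int.natCast_inj]
  have hmem0 : j0 ∈ (Finset.range n).filter
      (fun (j : Nat) => PySem.Set.contains u ((j : Nat) : Int) = false) := by
    simp only [Finset.mem_filter, Finset.mem_range]
    exact ⟨hj, hu⟩
  have h1 : (Finset.range n).filter
        (fun (j : Nat) => PySem.Set.contains (PySem.Set.add u (j0 : Int)) ((j : Nat) : Int) = false)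
      = ((Finset.range n).filter
          (fun (j : Nat) => PySem.Set.contains u ((j : Nat) : Int) = false)).erase j0 := by
    ext j
    simp only [Finset.mem_filter, Finset.mem_erase, hmem]
    tauto
  have hpos : 0 < ((Finset.range n).filter
      (fun (j : Nat) => PySem.Set.contains u ((j : Nat) : Int) = false)).card :=
    Finset.card_pos.mpr ⟨j0, hmem0⟩
  unfold pvUnused
  rw [h1, Finset.card_erase_of_mem hmem0]
  omega

-- the one-item action of pvProc at depth d+1, as a named function
def pvStep (items : List (Int × List String × String)) (T : String) (AS : PySem.Set String)
    (d : Nat) (known : PySem.Set String) (used : PySem.Set Int) (path : List Int)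
    (st : PySem.Set (List Int) × List (List Int)) (it : Int × List String × String) :
    PySem.Set (List Int) × List (List Int) :=
  if PySem.Set.contains used it.1 || PySem.Set.contains known it.2.2 then st
  else
    let others := it.2.1.filter (fun x => x != it.2.2)
    let unknown := others.filter (fun x => !(PySem.Set.contains known x))
    if unknown.isEmpty then
      pvProc items T AS d (PySem.Set.add known it.2.2) (PySem.Set.add used it.1)
        (path ++ [it.1]) items
        (if it.2.2 = T then pvEmit st (path ++ [it.1]) else st)
    else if it.2.2 = T ∧ unknown.all (fun x => PySem.Set.contains AS x) then
      pvEmit st (path ++ [it.1])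
    else st

lemma pvProc_succ (items : List (Int × List String × String)) (T : String)
    (AS : PySem.Set String) (d : Nat) (k : PySem.Set String) (u : PySem.Set Int)
    (p : List Int) (ws : List (Int × List String × String))
    (st : PySem.Set (List Int) × List (List Int)) :
    pvProc items T AS (d+1) k u p ws st = ws.foldl (pvStep items T AS d k u p) st := rfl

-- Source B's stack machine, run with enough fuel, finishes the top frame exactly as
-- pvProc does and then continues with the rest of the stack
lemma pv_run_eq_proc (items : List (Int × List String × String)) (T : String)
    (AS : PySem.Set String) (n : Nat)
    (hidx : ∀ it ∈ items, ∃ j : Nat, j < n ∧ it.1 = (j : Int)) :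
    ∀ (d : Nat) (k : PySem.Set String) (u : PySem.Set Int) (p : List Int)
      (ws : List (Int × List String × String))
      (rest : List (PySem.Set String × PySem.Set Int × List Int × List (Int × List String × String)))
      (st : PySem.Set (List Int) × List (List Int)),
      pvUnused n u ≤ d → ws.Sublist items →
      ∃ m, m ≤ ws.length * (1 + pvFuel items.length d) + 1 ∧
        ∀ fuel, pvRunB items T AS (fuel + m) ((k, u, p, ws) :: rest) st
              = pvRunB items T AS fuel rest (pvProc items T AS (d+1) k u p ws st) := by
  intro d
  induction d using Nat.strong_induction_on with
  | _ d IHd =>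
    intro k u p ws
    induction ws with
    | nil =>
      intro rest st hd hsub
      refine ⟨1, by simp, ?_⟩
      intro fuel
      simp only [pvRunB, pvProc, List.foldl_nil]
    | cons it ws' IHw =>
      obtain ⟨i, e, c⟩ := it
      intro rest st hd hsub
      have hsub' : ws'.Sublist items := (List.sublist_cons_self _ _).trans hsub
      by_cases hskip : (PySem.Set.contains u i || PySem.Set.contains k c) = true
      · -- skipped item
        obtain ⟨m', hm', heq'⟩ := IHw rest st hd hsub'
        refine ⟨m' + 1, ?_, ?_⟩
        · have hx : (ws'.length + 1) * (1 + pvFuel items.length d)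
              = ws'.length * (1 + pvFuel items.length d) + (1 + pvFuel items.length d) := by ring
          simp only [List.length_cons]
          omega
        · intro fuel
          have h2 : fuel + (m' + 1) = (fuel + m') + 1 := by omega
          rw [h2]
          simp only [pvRunB]
          have hstep : pvStep items T AS d k u p st (i, e, c) = st := by
            simp only [pvStep]
            rw [if_pos hskip]
          rw [if_pos hskip, heq' fuel, pvProc_succ items T AS d k u p ((i, e, c) :: ws') st,
            List.foldl_cons, hstep, ← pvProc_succ]
      · -- not skipped
        by_cases hie : (((e.filter fun x => x != c).filter
            fun x => !(PySem.Set.contains k x)).isEmpty) = true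
        · -- descend into the child frame
          have hi : PySem.Set.contains u i = false := by
            cases h : PySem.Set.contains u i
            · rfl
            · exact absurd (by rw [h, Bool.true_or]) hskip
          obtain ⟨j0, hj0, hij⟩ := hidx (i, e, c) (hsub.subset (List.mem_cons_self ..))
          have hij' : i = (j0 : Int) := hij
          have hu0 : PySem.Set.contains u (j0 : Int) = false := by rw [← hij']; exact hi
          have hdec : pvUnused n (PySem.Set.add u i) + 1 = pvUnused n u := by
            rw [hij']; exact pvUnused_add n u j0 hj0 hu0
          obtain ⟨d'', rfl⟩ : ∃ d'', d = d'' + 1 := by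
            cases d
            · exfalso; omega
            · exact ⟨_, rfl⟩
          have hdc : pvUnused n (PySem.Set.add u i) ≤ d'' := by omega
          obtain ⟨mc, hmc, heqc⟩ := IHd d'' (by omega) (PySem.Set.add k c) (PySem.Set.add u i)
            (p ++ [i]) items ((k, u, p, ws') :: rest)
            (if c = T then pvEmit st (p ++ [i]) else st) hdc (List.Sublist.refl items)
          obtain ⟨m', hm', heq'⟩ := IHw rest
            (pvProc items T AS (d''+1) (PySem.Set.add k c) (PySem.Set.add u i) (p ++ [i]) items
              (if c = T then pvEmit st (p ++ [i]) else st)) hd hsub'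
          refine ⟨m' + mc + 1, ?_, ?_⟩
          · have hF : pvFuel items.length (d''+1)
                = items.length * (1 + pvFuel items.length d'') + 1 := rfl
            have hx : (ws'.length + 1) * (1 + pvFuel items.length (d''+1))
                = ws'.length * (1 + pvFuel items.length (d''+1))
                  + (1 + pvFuel items.length (d''+1)) := by ring
            simp only [List.length_cons]
            omega
          · intro fuel
            have h2 : fuel + (m' + mc + 1) = ((fuel + m') + mc) + 1 := by omega
            rw [h2]
            simp only [pvRunB]
            rw [if_neg hskip]
            simp only [hie, if_true]
            have hstep : pvStep items T AS (d''+1) k u p st (i, e, c)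
                = pvProc items T AS (d''+1) (PySem.Set.add k c) (PySem.Set.add u i) (p ++ [i]) items
                    (if c = T then pvEmit st (p ++ [i]) else st) := by
              simp only [pvStep]
              rw [if_neg hskip]
              simp only [hie, if_true]
            rw [heqc (fuel + m'), heq' fuel,
              pvProc_succ items T AS (d''+1) k u p ((i, e, c) :: ws') st,
              List.foldl_cons, hstep, ← pvProc_succ]
        · -- terminal item: possibly emit, then continue the same frame
          obtain ⟨m', hm', heq'⟩ := IHw rest
            (if c = T ∧ (((e.filter fun x => x != c).filter
                fun x => !(PySem.Set.contains k x)).all fun x => PySem.Set.contains AS x) = true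
            then pvEmit st (p ++ [i]) else st) hd hsub'
          refine ⟨m' + 1, ?_, ?_⟩
          · have hx : (ws'.length + 1) * (1 + pvFuel items.length d)
                = ws'.length * (1 + pvFuel items.length d) + (1 + pvFuel items.length d) := by ring
            simp only [List.length_cons]
            omega
          · intro fuel
            have h2 : fuel + (m' + 1) = (fuel + m') + 1 := by omega
            rw [h2]
            simp only [pvRunB]
            rw [if_neg hskip]
            simp only [hie, Bool.false_eq_true, if_false]
            have hstep : pvStep items T AS d k u p st (i, e, c)
                = (if c = T ∧ (((e.filter fun x => x != c).filter
                      fun x => !(PySem.Set.contains k x)).all fun x => PySem.Set.contains AS x) = true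
                  then pvEmit st (p ++ [i]) else st) := by
              simp only [pvStep]
              rw [if_neg hskip]
              simp only [hie, Bool.false_eq_true, if_false]
            rw [pvProc_succ items T AS d k u p ((i, e, c) :: ws') st, List.foldl_cons, hstep,
              ← pvProc_succ]
            split_ifs with hcond
            · rw [if_pos hcond] at heq'
              exact heq' fuel
            · rw [if_neg hcond] at heq'
              exact heq' fuel

lemma pv_run_nil (items : List (Int × List String × String)) (T : String)
    (AS : PySem.Set String) (fuel : Nat) (st : PySem.Set (List Int) × List (List Int)) :
    pvRunB items T AS fuel [] st = st := by
  cases fuel <;> rfl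

lemma pv_items_idx (H : List (List String)) :
    ∀ it ∈ pvItems H, ∃ j : Nat, j < H.length ∧ it.1 = (j : Int) := by
  intro it hit
  unfold pvItems at hit
  simp only [List.mem_flatMap, PySem.List.mem_enumerate_iff, List.mem_map] at hit
  obtain ⟨p, ⟨k, hk, hp⟩, c, hc, hitc⟩ := hit
  subst hp
  exact ⟨k, hk, by simp [← hitc]⟩

theorem pv_main (hyperedges : List (List String)) (target_cell : String) (ik : List String) :
    find_inference_paths_str hyperedges target_cell (some ik)
      = find_inference_paths_str_alt hyperedges target_cell (some ik) := by
  have hidx := pv_items_idx hyperedges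
  have hd : pvUnused hyperedges.length PySem.Set.empty ≤ hyperedges.length :=
    le_trans (Finset.card_filter_le _ _) (le_of_eq (Finset.card_range _))
  obtain ⟨m, hm, heq⟩ := pv_run_eq_proc (pvItems hyperedges) target_cell
    (PySem.Set.diff (PySem.Set.diff
      (hyperedges.foldl (fun s e => PySem.Set.update s e) PySem.Set.empty)
      (PySem.Set.ofList ik)) [target_cell])
    hyperedges.length hidx hyperedges.length (PySem.Set.ofList ik) PySem.Set.empty []
    (pvItems hyperedges) [] (PySem.Set.empty, []) hd (List.Sublist.refl _)
  have hmF : m ≤ pvFuel (pvItems hyperedges).length (hyperedges.length + 1) := hm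
  simp only [find_inference_paths_str, find_inference_paths_str_alt]
  rw [pvDfsA_eq_proc]
  rw [show pvFuel (pvItems hyperedges).length (hyperedges.length + 1)
      = (pvFuel (pvItems hyperedges).length (hyperedges.length + 1) - m) + m
    from (Nat.sub_add_cancel hmF).symm]
  rw [heq, pv_run_nil]

-- ===== VERDICT (by name: the statement is the Claim_ definition above) =====
theorem find_inference_paths_str_spec : Claim_equal_find_inference_paths_str := by
  intro hyperedges target_cell initial_known _ hpre
  unfold Spec_find_inference_paths_str
  match initial_known with
  | none => simp [Pre_find_inference_paths_str] at hpre
  | some ik => exact pv_main hyperedges target_cell ik
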